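-- pv_equiv track=rewrite | github.com/czub0002/FYP | final/Publisher Scripts/author_fuzzy_compare.py | modify_name_format
-- ===== SOURCE A (Python) =====
-- def modify_name_format(name):
--     name = name.replace(".", " ").replace("  ", " ")
--     modified_name = ''
--     name += ' '
--     if not name.isupper():
--         for i in range(len(name) - 1):
--             if name[i].isupper() and ((name[i + 1].isupper()) or (name[i + 1] == " ")):
--                 modified_name += name[i] + '.' + ' '
--             else:
--                 modified_name += name[i]
--     else:
--         modified_name = name
--     return modified_name.strip()
-- ===== SOURCE B (Python) =====
-- def modify_name_format(name):
--     name = name.replace(".", " ").replace("  ", " ")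
--     if name.isupper():
--         return name.strip()
--     words = []
--     for word in name.split(' '):
--         parts = []
--         for j, c in enumerate(word):
--             if c.isupper() and (j + 1 == len(word) or word[j + 1].isupper()):
--                 parts.append(c + '. ')
--             else:
--                 parts.append(c)
--         words.append(''.join(parts))
--     return ' '.join(words).strip()
-- ===== Notes on version B (the rewrite author's own statement) =====
-- stated objective: simpler
-- what changed: B replaces A's global index scan over the sentinel-padded string by splitting the preprocessed name on the space character into words, transforming each word locally (an uppercase letter gets a dot-space when followed by another uppercase letter or at word end), and rejoining the words.
import Mathlib
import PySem

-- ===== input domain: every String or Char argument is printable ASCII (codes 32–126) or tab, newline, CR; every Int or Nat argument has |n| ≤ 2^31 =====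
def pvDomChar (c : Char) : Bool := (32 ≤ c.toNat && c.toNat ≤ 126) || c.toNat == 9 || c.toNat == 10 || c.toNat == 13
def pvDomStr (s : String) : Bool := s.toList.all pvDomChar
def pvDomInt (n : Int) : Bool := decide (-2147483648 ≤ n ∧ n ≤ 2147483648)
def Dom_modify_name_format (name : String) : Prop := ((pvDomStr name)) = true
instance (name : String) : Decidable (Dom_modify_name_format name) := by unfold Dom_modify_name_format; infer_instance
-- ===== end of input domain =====

-- B restructures A's sentinel-space index scan as split-on-space / transform each word / rejoin; same output, simpler decomposition.

-- str.isupper() on the whole string: at least one cased character and no lowercase one — exact on the ASCII domain (both Pythons call it identically)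
def pvStrIsupper (cs : List Char) : Bool :=
  cs.any PySem.Chars.isupper && !(cs.any PySem.Chars.islower)

-- ===== PORT A =====
-- A's loop 'for i in range(len(name)-1)' reading name[i], name[i+1]: structural recursion over adjacent pairs
def pvAgo : List Char → List Char
  | c :: d :: rest =>
      (if PySem.Chars.isupper c && (PySem.Chars.isupper d || d == ' ')
       then [c, '.', ' '] else [c]) ++ pvAgo (d :: rest)
  | _ => []

def modify_name_format (name : String) : String :=
  let cs := PySem.Chars.replace (PySem.Chars.replace name.toList ['.'] [' ']) [' ', ' '] [' ']
  let cs := cs ++ [' ']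
  let modified := if !(pvStrIsupper cs) then pvAgo cs else cs
  String.ofList (PySem.Chars.strip modified)

-- ===== PORT B =====
-- B's inner loop over a word with lookahead 'j+1 == len(word) or word[j+1].isupper()'
def pvBword : List Char → List Char
  | [] => []
  | [c] => if PySem.Chars.isupper c then [c, '.', ' '] else [c]
  | c :: d :: rest =>
      (if PySem.Chars.isupper c && PySem.Chars.isupper d
       then [c, '.', ' '] else [c]) ++ pvBword (d :: rest)

def modify_name_format_alt (name : String) : String :=
  let cs := PySem.Chars.replace (PySem.Chars.replace name.toList ['.'] [' ']) [' ', ' '] [' ']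
  if pvStrIsupper cs then
    String.ofList (PySem.Chars.strip cs)
  else
    String.ofList (PySem.Chars.strip
      (PySem.Chars.join [' '] ((PySem.Chars.splitOn cs [' ']).map pvBword)))

-- ===== PRECONDITION & SPEC =====
def Spec_modify_name_format (name : String) (out : String) : Prop := out = modify_name_format_alt name
instance (name : String) (out : String) : Decidable (Spec_modify_name_format name out) := by unfold Spec_modify_name_format; infer_instance

-- ===== CLAIM (what is proved, stated in full; the proofs are below) =====
def Claim_equal_modify_name_format : Prop := ∀ (name : String), Dom_modify_name_format name → Spec_modify_name_format name (modify_name_format name)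

-- ===== LEMMAS AND PROOFS =====

-- simple recursive characterisation of s.split(' ')
def pvSplit : List Char → List (List Char)
  | [] => [[]]
  | c :: rest => if c = ' ' then [] :: pvSplit rest else (pvSplit rest).modifyHead (c :: ·)

theorem pvSplit_ne_nil (cs : List Char) : pvSplit cs ≠ [] := by
  induction cs with
  | nil => simp [pvSplit]
  | cons c rest ih =>
    simp only [pvSplit]
    split
    · simp
    · cases h : pvSplit rest with
      | nil => exact absurd h ih
      | cons w ws => simp

theorem pvSplit_space (rest : List Char) : pvSplit (' ' :: rest) = [] :: pvSplit rest := by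
  simp [pvSplit]

theorem pvSplit_cons {c : Char} (rest : List Char) (hc : c ≠ ' ') :
    pvSplit (c :: rest) = (pvSplit rest).modifyHead (c :: ·) := by
  simp [pvSplit, hc]

theorem pvSplitOn_go_spec (fuel : Nat) :
    ∀ (l cur : List Char) (accs : List (List Char)), l.length ≤ fuel →
      PySem.Chars.splitOn.go [' '] fuel l cur accs =
        accs.reverse ++ (pvSplit l).modifyHead (cur.reverse ++ ·) := by
  induction fuel with
  | zero =>
    intro l cur accs h
    have hl : l = [] := List.eq_nil_of_length_eq_zero (Nat.le_zero.mp h)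
    subst hl
    simp [PySem.Chars.splitOn.go, pvSplit]
  | succ fuel ih =>
    intro l cur accs h
    cases l with
    | nil => simp [PySem.Chars.splitOn.go, pvSplit]
    | cons c rest =>
      by_cases hc : c = ' '
      · subst hc
        rw [show PySem.Chars.splitOn.go [' '] (fuel + 1) (' ' :: rest) cur accs =
              PySem.Chars.splitOn.go [' '] fuel rest [] (cur.reverse :: accs) by
              simp [PySem.Chars.splitOn.go, List.isPrefixOf]]
        rw [ih rest [] (cur.reverse :: accs) (by simpa using h)]
        rw [pvSplit_space]
        cases hs : pvSplit rest with
        | nil => exact absurd hs (pvSplit_ne_nil rest)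
        | cons w ws => simp
      · rw [show PySem.Chars.splitOn.go [' '] (fuel + 1) (c :: rest) cur accs =
              PySem.Chars.splitOn.go [' '] fuel rest (c :: cur) accs by
              simp [PySem.Chars.splitOn.go, List.isPrefixOf, Ne.symm hc]]
        rw [ih rest (c :: cur) accs (by simpa using h)]
        rw [pvSplit_cons rest hc, List.modifyHead_modifyHead]
        cases hs : pvSplit rest with
        | nil => exact absurd hs (pvSplit_ne_nil rest)
        | cons w ws => simp

theorem pvSplitOn_eq (cs : List Char) : PySem.Chars.splitOn cs [' '] = pvSplit cs := by
  rw [PySem.Chars.splitOn, pvSplitOn_go_spec (cs.length + 1) cs [] [] (by omega)]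
  cases hs : pvSplit cs with
  | nil => exact absurd hs (pvSplit_ne_nil cs)
  | cons w ws => simp

-- join [' '] ((y ++ x) :: xs) pulls the common prefix y out
theorem pvJoin_head_append (y x : List Char) (xs : List (List Char)) :
    PySem.Chars.join [' '] ((y ++ x) :: xs) = y ++ PySem.Chars.join [' '] (x :: xs) := by
  cases xs with
  | nil => rw [PySem.Chars.join_singleton, PySem.Chars.join_singleton]
  | cons z zs => rw [PySem.Chars.join_cons_cons, PySem.Chars.join_cons_cons]; simp

-- the heart: A's pair scan over (base ++ [' ']) equals B's split/transform/join over base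
theorem pvMain (base : List Char) :
    pvAgo (base ++ [' ']) = PySem.Chars.join [' '] ((pvSplit base).map pvBword) := by
  induction base with
  | nil => simp [pvAgo, pvSplit, pvBword, PySem.Chars.join_singleton]
  | cons c rest ih =>
    by_cases hc : c = ' '
    · subst hc
      rw [pvSplit_space, List.map_cons]
      obtain ⟨d, t, hrest⟩ : ∃ d t, rest ++ [' '] = d :: t := by
        cases rest with
        | nil => exact ⟨' ', [], rfl⟩
        | cons a b => exact ⟨a, b ++ [' '], rfl⟩
      rw [List.cons_append, hrest]
      rw [show pvAgo (' ' :: d :: t) =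
            (if PySem.Chars.isupper ' ' && (PySem.Chars.isupper d || d == ' ')
             then [' ', '.', ' '] else [' ']) ++ pvAgo (d :: t) from rfl]
      rw [show PySem.Chars.isupper ' ' = false by decide]
      rw [← hrest, ih]
      cases hs : (pvSplit rest).map pvBword with
      | nil => exact absurd (List.map_eq_nil_iff.mp hs) (pvSplit_ne_nil rest)
      | cons w ws =>
        rw [show pvBword [] = ([] : List Char) from rfl, PySem.Chars.join_cons_cons]
        simp
    · cases rest with
      | nil =>
        rw [pvSplit_cons [] hc]
        rw [show pvSplit [] = [[]] from rfl]
        rw [show List.modifyHead (c :: ·) [([] : List Char)] = [[c]] from rfl]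
        rw [List.map_cons, List.map_nil, PySem.Chars.join_singleton]
        rw [show ([c] ++ [' '] : List Char) = [c, ' '] by simp]
        rw [show pvAgo [c, ' '] =
              (if PySem.Chars.isupper c && (PySem.Chars.isupper ' ' || (' ' == ' '))
               then [c, '.', ' '] else [c]) ++ pvAgo [' '] from rfl]
        rw [show pvAgo [' '] = [] from rfl]
        simp [pvBword, show PySem.Chars.isupper ' ' = false by decide]
      | cons d rest' =>
        by_cases hd : d = ' '
        · subst hd
          rw [show (c :: ' ' :: rest') ++ [' '] = c :: ((' ' :: rest') ++ [' ']) by simp]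
          rw [show pvAgo (c :: ((' ' :: rest') ++ [' '])) =
                (if PySem.Chars.isupper c && (PySem.Chars.isupper ' ' || (' ' == ' '))
                 then [c, '.', ' '] else [c]) ++ pvAgo ((' ' :: rest') ++ [' ']) by
                rw [List.cons_append]; rfl]
          rw [ih, pvSplit_space, List.map_cons]
          rw [pvSplit_cons (' ' :: rest') hc, pvSplit_space, List.modifyHead, List.map_cons]
          have hstep : (if PySem.Chars.isupper c && (PySem.Chars.isupper ' ' || (' ' == ' '))
              then [c, '.', ' '] else [c]) = pvBword [c] := by
            simp [pvBword, show PySem.Chars.isupper ' ' = false by decide]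
          rw [hstep]
          rw [show pvBword [c] :: (pvSplit rest').map pvBword
                = (pvBword [c] ++ ([] : List Char)) :: (pvSplit rest').map pvBword by simp]
          rw [pvJoin_head_append]
          rw [show pvBword ([] : List Char) = ([] : List Char) from rfl]
        · rw [pvSplit_cons rest' hd] at ih
          rw [pvSplit_cons (d :: rest') hc, pvSplit_cons rest' hd, List.modifyHead_modifyHead]
          cases hs : pvSplit rest' with
          | nil => exact absurd hs (pvSplit_ne_nil rest')
          | cons w ws =>
            rw [hs] at ih
            rw [show (c :: d :: rest') ++ [' '] = c :: ((d :: rest') ++ [' ']) by simp]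
            rw [show pvAgo (c :: ((d :: rest') ++ [' '])) =
                  (if PySem.Chars.isupper c && (PySem.Chars.isupper d || (d == ' '))
                   then [c, '.', ' '] else [c]) ++ pvAgo ((d :: rest') ++ [' ']) by
                  rw [List.cons_append]; rfl]
            rw [ih]
            rw [show (d == ' ') = false by simpa using hd, Bool.or_false]
            simp only [List.modifyHead, List.map_cons, Function.comp] at *
            rw [show pvBword (c :: d :: w) =
                  (if PySem.Chars.isupper c && PySem.Chars.isupper d
                   then [c, '.', ' '] else [c]) ++ pvBword (d :: w) from rfl]
            rw [pvJoin_head_append]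

theorem pvRstrip_append_space (y : List Char) :
    PySem.Chars.rstrip (y ++ [' ']) = PySem.Chars.rstrip y := by
  simp only [PySem.Chars.rstrip, List.reverse_append, List.reverse_cons, List.reverse_nil,
    List.nil_append, List.cons_append]
  rw [List.dropWhile_cons_of_pos (by decide : PySem.Chars.isspace ' ' = true)]

theorem pvStrip_append_space (x : List Char) :
    PySem.Chars.strip (x ++ [' ']) = PySem.Chars.strip x := by
  simp only [PySem.Chars.strip, PySem.Chars.lstrip, List.dropWhile_append]
  by_cases h : (List.dropWhile PySem.Chars.isspace x).isEmpty
  · simp [PySem.Chars.rstrip, show PySem.Chars.isspace ' ' = true by decide,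
      List.isEmpty_iff.mp h]
  · simp only [h, Bool.false_eq_true, ite_false]
    exact pvRstrip_append_space _

theorem pvStrIsupper_append_space (cs : List Char) :
    pvStrIsupper (cs ++ [' ']) = pvStrIsupper cs := by
  simp [pvStrIsupper, List.any_append, show PySem.Chars.isupper ' ' = false by decide,
    show PySem.Chars.islower ' ' = false by decide]

-- ===== VERDICT (by name: the statement is the Claim_ definition above) =====
theorem modify_name_format_spec : Claim_equal_modify_name_format := by
  intro name _
  unfold Spec_modify_name_format modify_name_format modify_name_format_alt
  set cs := PySem.Chars.replace (PySem.Chars.replace name.toList ['.'] [' ']) [' ', ' '] [' '] with hcs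
  simp only [pvStrIsupper_append_space]
  by_cases h : pvStrIsupper cs
  · simp [h, pvStrip_append_space]
  · simp only [h, Bool.not_false, if_true, Bool.false_eq_true, if_false]
    rw [pvMain, pvSplitOn_eq]
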